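-- pv_equiv track=rewrite | github.com/think41/extrasuite | extradoc/src/extradoc/v2/generators/table.py | _calculate_new_table_cell_starts
-- ===== SOURCE A (Python) =====
-- def _calculate_new_table_cell_starts(
--     insert_location_index: int, rows: int, cols: int
-- ) -> dict[tuple[int, int], int]:
--     """Calculate cell content start indexes for a newly inserted empty table."""
--     cell_starts: dict[tuple[int, int], int] = {}
--     idx = insert_location_index + 1 + 1  # +1 newline, +1 table marker
--
--     for row in range(rows):
--         idx += 1  # Row marker
--         for col in range(cols):
--             idx += 1  # Cell marker
--             cell_starts[(row, col)] = idx
--             idx += 1  # Default empty paragraph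
--
--     return cell_starts
-- ===== SOURCE B (Python) =====
-- def _calculate_new_table_cell_starts(insert_location_index, rows, cols):
--     """Closed-form: each cell start is derived directly from (row, col)."""
--     base = insert_location_index + 4
--     width = 2 * cols + 1
--     return {
--         (r, c): base + r * width + 2 * c
--         for r in range(rows)
--         for c in range(cols)
--     }
-- ===== Notes on version B (the rewrite author's own statement) =====
-- stated objective: simpler
-- what changed: Replaced the running idx accumulator threaded through nested loops by a closed-form formula per cell: start = insert_location_index + 4 + row*(2*cols+1) + 2*col, built as a dict comprehension.
import Mathlib
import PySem

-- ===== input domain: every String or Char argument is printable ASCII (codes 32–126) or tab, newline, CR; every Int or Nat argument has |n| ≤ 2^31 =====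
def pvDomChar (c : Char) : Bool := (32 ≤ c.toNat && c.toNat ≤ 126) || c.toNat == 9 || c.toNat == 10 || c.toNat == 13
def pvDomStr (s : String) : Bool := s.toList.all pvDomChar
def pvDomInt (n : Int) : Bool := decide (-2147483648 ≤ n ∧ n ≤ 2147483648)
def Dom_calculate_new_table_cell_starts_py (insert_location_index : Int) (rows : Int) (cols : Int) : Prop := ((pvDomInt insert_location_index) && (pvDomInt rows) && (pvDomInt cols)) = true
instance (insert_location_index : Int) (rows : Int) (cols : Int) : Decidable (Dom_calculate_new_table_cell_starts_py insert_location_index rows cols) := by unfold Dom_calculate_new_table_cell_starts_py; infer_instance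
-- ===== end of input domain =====

-- B replaces A's running idx accumulator with a closed-form start index per (row, col): simpler, same cost.

-- ===== PORT A =====
-- idx = insert_location_index + 1 + 1; per row: idx += 1 (row marker); per cell: idx += 1 (cell
-- marker), record idx, idx += 1 (empty paragraph). 'idx' is the first state component, the dict
-- (unique keys, so insertion = append) the second.
def calculate_new_table_cell_starts_py (insert_location_index : Int) (rows : Int) (cols : Int) : List (Int × Int × Int) :=
  ((PySem.List.pyRange 0 rows 1).foldl
    (fun st row =>
      (PySem.List.pyRange 0 cols 1).foldl
        (fun s col => (s.1 + 1 + 1, s.2 ++ [(row, col, s.1 + 1)]))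
        (st.1 + 1, st.2))
    (insert_location_index + 1 + 1, ([] : List (Int × Int × Int)))).2

-- ===== PORT B =====
def calculate_new_table_cell_starts_py_alt (insert_location_index : Int) (rows : Int) (cols : Int) : List (Int × Int × Int) :=
  (PySem.List.pyRange 0 rows 1).flatMap (fun r =>
    (PySem.List.pyRange 0 cols 1).map (fun c =>
      (r, c, insert_location_index + 4 + r * (2 * cols + 1) + 2 * c)))

-- ===== PRECONDITION & SPEC =====
def Spec_calculate_new_table_cell_starts_py (insert_location_index : Int) (rows : Int) (cols : Int) (out : List (Int × Int × Int)) : Prop := out = calculate_new_table_cell_starts_py_alt insert_location_index rows cols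
instance (insert_location_index : Int) (rows : Int) (cols : Int) (out : List (Int × Int × Int)) : Decidable (Spec_calculate_new_table_cell_starts_py insert_location_index rows cols out) := by unfold Spec_calculate_new_table_cell_starts_py; infer_instance

-- ===== CLAIM (what is proved, stated in full; the proofs are below) =====
def Claim_equal_calculate_new_table_cell_starts_py : Prop := ∀ (insert_location_index : Int) (rows : Int) (cols : Int), Dom_calculate_new_table_cell_starts_py insert_location_index rows cols → Spec_calculate_new_table_cell_starts_py insert_location_index rows cols (calculate_new_table_cell_starts_py insert_location_index rows cols)

-- ===== LEMMAS AND PROOFS =====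

-- pyRange(0, n) as a Nat range, uniformly for every Int n (empty when n <= 0)
theorem pvRange0 (n : Int) :
    PySem.List.pyRange 0 n 1 = List.map (fun k : Nat => (k : Int)) (List.range n.toNat) := by
  by_cases h : 0 <= n
  · obtain ⟨m, rfl⟩ := Int.eq_ofNat_of_zero_le h
    simpa using PySem.List.pyRange_zero_natCast m
  · have hz : n.toNat = 0 := by omega
    rw [hz]
    simp [PySem.List.pyRange]
    omega

-- inner loop of A over one row, as a map with a closed-form start index
theorem pvInner (row i : Int) (acc : List (Int × Int × Int)) (c : Nat) :
    (List.map (fun k : Nat => (k : Int)) (List.range c)).foldl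
      (fun s col => (s.1 + 1 + 1, s.2 ++ [(row, col, s.1 + 1)])) (i, acc)
    = (i + 2 * c,
       acc ++ List.map (fun k : Nat => (row, (k : Int), i + 1 + 2 * (k : Int))) (List.range c)) := by
  induction c with
  | zero => simp
  | succ m ih =>
    rw [List.range_succ, List.map_append, List.foldl_append, ih]
    simp [Prod.mk.injEq]
    constructor
    · ring
    · ring

-- outer loop of A, with the full invariant on (idx, acc)
theorem pvOuter (ili cols : Int) (r : Nat) :
    (List.map (fun k : Nat => (k : Int)) (List.range r)).foldl
      (fun st row =>
        (PySem.List.pyRange 0 cols 1).foldl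
          (fun s col => (s.1 + 1 + 1, s.2 ++ [(row, col, s.1 + 1)]))
          (st.1 + 1, st.2))
      (ili + 1 + 1, ([] : List (Int × Int × Int)))
    = (ili + 2 + r * (2 * (cols.toNat : Int) + 1),
       (List.range r).flatMap (fun rr : Nat =>
         List.map (fun cc : Nat =>
           ((rr : Int), (cc : Int), ili + 4 + (rr : Int) * (2 * (cols.toNat : Int) + 1) + 2 * (cc : Int)))
           (List.range cols.toNat))) := by
  induction r with
  | zero => simp; ring
  | succ m ih =>
    rw [List.range_succ, List.map_append, List.foldl_append, ih]
    simp only [List.map_cons, List.map_nil, List.foldl_cons, List.foldl_nil]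
    rw [pvRange0, pvInner]
    rw [List.flatMap_append]
    simp only [List.flatMap_cons, List.flatMap_nil, List.append_nil, Prod.mk.injEq]
    constructor
    · push_cast; ring
    · congr 1
      apply List.map_congr_left
      intro k _
      refine Prod.ext rfl (Prod.ext rfl ?_)
      push_cast
      ring

-- ===== VERDICT (by name: the statement is the Claim_ definition above) =====
theorem calculate_new_table_cell_starts_py_spec : Claim_equal_calculate_new_table_cell_starts_py := by
  intro ili rows cols _
  unfold Spec_calculate_new_table_cell_starts_py calculate_new_table_cell_starts_py calculate_new_table_cell_starts_py_alt
  rw [pvRange0 rows, pvOuter]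
  by_cases h : 0 <= cols
  · have hc : (cols.toNat : Int) = cols := Int.toNat_of_nonneg h
    rw [pvRange0 cols]
    simp [List.flatMap_map, Function.comp_def, hc]
  · have hz : cols.toNat = 0 := by omega
    rw [pvRange0 cols, hz]
    simp only [List.range_zero, List.map_nil, List.map_nil]
    trans ([] : List (Int × Int × Int)) <;> simp [List.flatMap_eq_nil_iff]
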